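-- pv_equiv track=rewrite | github.com/adeavins/fluxion | fluxion/tools/multimethod.py | is_uncertain
-- ===== SOURCE A (Python) =====
-- def is_uncertain(generality_list):
--     # Assumes that ``all_comparable`` is ``True``
--     has_specific = False
--     has_general = False
--     for generality in generality_list:
--         if generality > 0:
--             if has_specific:
--                 return True
--             has_general = True
--         elif generality < 0:
--             if has_general:
--                 return True
--             has_specific = True
--
--     return False
-- ===== SOURCE B (Python) =====
-- def is_uncertain(generality_list):
--     # True iff the list contains both a positive and a negative generality.
--     return any(g > 0 for g in generality_list) and any(g < 0 for g in generality_list)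
-- ===== Notes on version B (the rewrite author's own statement) =====
-- stated objective: simpler
-- what changed: Replaced the stateful single pass with two flags and mid-loop early returns by two independent existence checks ANDed together: the list has a positive and a negative element.
import Mathlib
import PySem

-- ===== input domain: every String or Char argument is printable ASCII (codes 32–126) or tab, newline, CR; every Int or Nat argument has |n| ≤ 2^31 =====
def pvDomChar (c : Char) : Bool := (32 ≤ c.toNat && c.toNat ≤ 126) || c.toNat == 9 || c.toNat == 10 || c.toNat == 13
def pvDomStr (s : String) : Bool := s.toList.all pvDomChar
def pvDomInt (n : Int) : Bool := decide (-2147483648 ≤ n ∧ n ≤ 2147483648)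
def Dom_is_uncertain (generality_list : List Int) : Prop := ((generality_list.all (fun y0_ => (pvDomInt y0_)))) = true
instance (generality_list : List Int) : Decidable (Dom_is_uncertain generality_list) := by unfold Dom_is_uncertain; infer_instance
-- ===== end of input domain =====

-- B replaces A's stateful flag loop with two independent existence checks (simpler).

-- ===== PORT A =====
-- A's loop over generality_list carrying the two flags (has_specific, has_general),
-- with the early `return True` branches in the same order as the Python.
def is_uncertain_loop (l : List Int) (has_specific has_general : Bool) : Bool :=
  match l with
  | [] => false
  | g :: rest =>
    if g > 0 then
      if has_specific then true else is_uncertain_loop rest has_specific true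
    else if g < 0 then
      if has_general then true else is_uncertain_loop rest true has_general
    else
      is_uncertain_loop rest has_specific has_general

def is_uncertain (generality_list : List Int) : Bool :=
  is_uncertain_loop generality_list false false

-- ===== PORT B =====
def is_uncertain_alt (generality_list : List Int) : Bool :=
  generality_list.any (fun g => g > 0) && generality_list.any (fun g => g < 0)

-- ===== PRECONDITION & SPEC =====
def Spec_is_uncertain (generality_list : List Int) (out : Bool) : Prop := out = is_uncertain_alt generality_list
instance (generality_list : List Int) (out : Bool) : Decidable (Spec_is_uncertain generality_list out) := by unfold Spec_is_uncertain; infer_instance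

-- ===== CLAIM (what is proved, stated in full; the proofs are below) =====
def Claim_equal_is_uncertain : Prop := ∀ (generality_list : List Int), Dom_is_uncertain generality_list → Spec_is_uncertain generality_list (is_uncertain generality_list)

-- ===== LEMMAS AND PROOFS =====

-- Invariant of A's loop: it returns true iff a positive was (or will be) paired with a negative,
-- where hs records a negative already seen and hg a positive already seen.
theorem is_uncertain_loop_eq (l : List Int) (hs hg : Bool) :
    is_uncertain_loop l hs hg =
      ((hs && l.any (fun g => g > 0)) || (hg && l.any (fun g => g < 0)) ||
        (l.any (fun g => g > 0) && l.any (fun g => g < 0))) := by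
  induction l generalizing hs hg with
  | nil => simp [is_uncertain_loop]
  | cons g rest ih =>
    simp only [is_uncertain_loop, List.any_cons]
    by_cases h1 : g > 0
    · have h2 : ¬ g < 0 := by omega
      simp [h1, h2, ih] <;> cases hs <;> cases hg <;> simp <;> tauto
    · by_cases h2 : g < 0 <;>
        simp [h1, h2, ih] <;> cases hs <;> cases hg <;> simp <;> tauto

-- ===== VERDICT (by name: the statement is the Claim_ definition above) =====
theorem is_uncertain_spec : Claim_equal_is_uncertain := by
  intro l _
  unfold Spec_is_uncertain is_uncertain is_uncertain_alt
  simp [is_uncertain_loop_eq]
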